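/- GENERATED by farm/mkstatement.py from design/units.tsv (unit `start_decoder.C15`) and the assertions of Vorbis/Spec/StartDecoderA.lean — do not edit.
   THE STATEMENT of the proof unit `start_decoder.C15`: segment C15 of `start_decoder` (8 instructions; entries 0x114dfa;
   exits 0x114788; ranges 0x114dfa-0x114e18)
   takes each of its entry assertions to one of its exit assertions (`Vorbis.Spec.StartDecoder.SegC15`), given the contracts of its callees.
   What the names mean: Vorbis/Spec/Basic.lean (the shared hypotheses), Vorbis/Spec/StartDecoderA.lean (the assertions). The theorem to prove:
   `theorem start_decoder_C15_ok : Vorbis.Spec.start_decoder_C15.Statement`. -/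
import Vorbis.Spec.Alloc
import Vorbis.Spec.StartDecoderA
namespace Vorbis.Spec.start_decoder_C15
open X86 X86.User Asan

/-- The statement of unit `start_decoder.C15`. -/
def Statement : Prop :=
  ∀ (Lay : Layout) (_hLay : Lay.hi = 0x1000000) (μ : Microarch) (_hμ : UserX.MicroOK μ) (u₀ : State)
    (_hcode : HasCodeNat Lay u₀ Vorbis.L.start_decoder.entry Vorbis.Code.code_start_decoder.nat Vorbis.L.start_decoder.size)
    (_h_asan_load4_noabort : Asan.SmallCheck Lay μ Vorbis.WayInv (Vorbis.CodeOK u₀) [.rax, .rcx, .rdx] 4 Vorbis.L.__asan_load4_noabort.entry)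
    (_h_setup_temp_free : ∀ (others : List Obj) (frames : List (Nat × FrameLayout)) (A : Arena) (m : Nat) (rest : List (Nat × Nat)), Calls Lay μ Vorbis.WayInv (Vorbis.conv u₀) Vorbis.L.setup_temp_free.entry (Vorbis.Spec.setup_temp_free.spec others frames A m rest)),
    Vorbis.Spec.StartDecoder.SegC15 Lay μ u₀

end Vorbis.Spec.start_decoder_C15
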